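-- pv_equiv track=rewrite | github.com/fowler-lab/Protein-Mutation-Viewer | app.py | merge_mutations
-- ===== SOURCE A (Python) =====
-- def merge_mutations(mutations1, mutations2):
--     '''Merge together two amino acid mutations
--
--     Args:
--         mutations1 (dict): Dictionary of index->{amino_acid->frequency}
--         mutation2 (dict): Dictionary of index->{amino_acid->frequency}
--     Returns:
--         dict: Dictionary mapping index->{amino_acid->[freq1, freq2]}
--     '''
--     keys = set(mutations1.keys()).union(mutations2.keys())
--     merged = {}
--     for key in keys:
--         x = mutations1.get(key, dict())
--         y = mutations2.get(key, dict())
--         merged_aa = {}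
--         aa_keys = set(x.keys()).union(set(y.keys()))
--         for aa_key in aa_keys:
--             aa_x = x.get(aa_key, 0)
--             aa_y = y.get(aa_key, 0)
--             merged_aa[aa_key] = [aa_x, aa_y]
--         merged[key] = merged_aa
--     return merged
-- ===== SOURCE B (Python) =====
-- def merge_mutations(mutations1, mutations2):
--     '''Merge together two amino acid mutations (two-pass seed-then-patch).'''
--     merged = {key: {aa: [freq, 0] for aa, freq in inner.items()}
--               for key, inner in mutations1.items()}
--     for key, inner in mutations2.items():
--         slot = merged.setdefault(key, {})
--         for aa, freq in inner.items():
--             if aa in slot: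
--                 slot[aa][1] = freq
--             else:
--                 slot[aa] = [0, freq]
--     return merged
-- ===== Notes on version B (the rewrite author's own statement) =====
-- stated objective: simpler
-- what changed: Replaces the key-set union with dual getD-lookups per key by two asymmetric passes: a comprehension seeds merged[key][aa]=[freq,0] from mutations1, then a single walk over mutations2 patches the second slot in place or inserts [0,freq]; Pre_ only restricts the Lean association lists to genuine dicts (no duplicate keys), excluding no Python input.
import Mathlib
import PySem

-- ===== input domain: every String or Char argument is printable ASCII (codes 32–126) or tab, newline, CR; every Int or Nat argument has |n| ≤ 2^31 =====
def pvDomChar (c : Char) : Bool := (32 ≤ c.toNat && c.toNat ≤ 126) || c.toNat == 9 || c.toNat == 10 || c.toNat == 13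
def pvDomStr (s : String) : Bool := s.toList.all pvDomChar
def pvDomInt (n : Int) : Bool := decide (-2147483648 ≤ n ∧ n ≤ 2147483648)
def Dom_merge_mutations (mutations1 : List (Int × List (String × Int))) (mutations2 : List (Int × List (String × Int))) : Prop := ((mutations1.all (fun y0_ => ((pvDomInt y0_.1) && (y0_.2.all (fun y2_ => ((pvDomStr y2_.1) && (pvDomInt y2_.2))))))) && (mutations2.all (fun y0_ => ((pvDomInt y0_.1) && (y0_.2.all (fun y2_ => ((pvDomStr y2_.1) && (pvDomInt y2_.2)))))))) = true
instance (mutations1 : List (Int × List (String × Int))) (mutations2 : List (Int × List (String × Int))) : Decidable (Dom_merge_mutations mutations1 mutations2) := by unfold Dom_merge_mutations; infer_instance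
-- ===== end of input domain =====

-- B replaces A's per-key set-union-plus-dual-lookup merge by two asymmetric passes: seed merged[key][aa]=[freq,0] from mutations1, then patch/extend with mutations2 (objective: simpler).
-- Python outputs are dicts (order-insensitive); both ports fix the same concrete key order.


-- ===== PORT A =====
-- transliteration of A: union the key sets, then per key union the amino-acid key sets and pair the two getD lookups
def merge_mutations (mutations1 : List (Int × List (String × Int))) (mutations2 : List (Int × List (String × Int))) : List (Int × List (String × List Int)) :=
  let d1 : PySem.Dict Int (List (String × Int)) := PySem.Dict.mk mutations1
  let d2 : PySem.Dict Int (List (String × Int)) := PySem.Dict.mk mutations2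
  let keys : PySem.Set Int := PySem.Set.union (PySem.Set.ofList d1.keys) d2.keys
  let merged : PySem.Dict Int (PySem.Dict String (List Int)) :=
    keys.foldl (fun merged key =>
      let x : PySem.Dict String Int := PySem.Dict.mk (d1.getD key [])
      let y : PySem.Dict String Int := PySem.Dict.mk (d2.getD key [])
      let aa_keys : PySem.Set String := PySem.Set.union (PySem.Set.ofList x.keys) (PySem.Set.ofList y.keys)
      let merged_aa : PySem.Dict String (List Int) :=
        aa_keys.foldl (fun acc aa_key => acc.insert aa_key [x.getD aa_key 0, y.getD aa_key 0]) PySem.Dict.empty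
      merged.insert key merged_aa) PySem.Dict.empty
  merged.items.map (fun r => (r.1, r.2.items))

-- ===== PORT B =====
-- transliteration of B (Source B): the patch loop over one inner dict of mutations2
def mmB_patch (slot : PySem.Dict String (List Int)) (inner : List (String × Int)) : PySem.Dict String (List Int) :=
  inner.foldl (fun s p =>
    if s.contains p.1 then s.modify p.1 [] (fun v => v.set 1 p.2)   -- slot[aa][1] = freq
    else s.insert p.1 [0, p.2]) slot

-- seed merged from mutations1 with [freq, 0] (the dict comprehension), then patch with mutations2
def merge_mutations_alt (mutations1 : List (Int × List (String × Int))) (mutations2 : List (Int × List (String × Int))) : List (Int × List (String × List Int)) :=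
  let init : PySem.Dict Int (PySem.Dict String (List Int)) :=
    PySem.Dict.mk (mutations1.map (fun q => (q.1, PySem.Dict.mk (q.2.map (fun p => (p.1, ([p.2, 0] : List Int)))))))
  let final : PySem.Dict Int (PySem.Dict String (List Int)) :=
    mutations2.foldl (fun acc q =>
      let slot := acc.getD q.1 PySem.Dict.empty      -- merged.setdefault(key, {}) …
      acc.insert q.1 (mmB_patch slot q.2)) init      -- … mutated in place = written back at the same position
  final.items.map (fun r => (r.1, r.2.items))

-- ===== PRECONDITION & SPEC =====
-- Pre_ only requires the association lists to represent Python dicts (no duplicate keys, outer or inner);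
-- every actual Python input (a dict of dicts) satisfies this, so no input A returns on is excluded.
def Pre_merge_mutations (mutations1 : List (Int × List (String × Int))) (mutations2 : List (Int × List (String × Int))) : Prop :=
  (mutations1.map Prod.fst).Nodup ∧ (∀ q ∈ mutations1, (q.2.map Prod.fst).Nodup) ∧
  (mutations2.map Prod.fst).Nodup ∧ (∀ q ∈ mutations2, (q.2.map Prod.fst).Nodup)
instance (mutations1 : List (Int × List (String × Int))) (mutations2 : List (Int × List (String × Int))) : Decidable (Pre_merge_mutations mutations1 mutations2) := by unfold Pre_merge_mutations; infer_instance
def pvWitness_merge_mutations : (List (Int × List (String × Int))) × (List (Int × List (String × Int))) :=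
  ([(1, [("A", 3), ("C", 2)]), (2, [("G", 1)])], [(1, [("C", 5), ("W", 7)]), (4, [("A", 1)])])
def Spec_merge_mutations (mutations1 : List (Int × List (String × Int))) (mutations2 : List (Int × List (String × Int))) (out : List (Int × List (String × List Int))) : Prop := out = merge_mutations_alt mutations1 mutations2
instance (mutations1 : List (Int × List (String × Int))) (mutations2 : List (Int × List (String × Int))) (out : List (Int × List (String × List Int))) : Decidable (Spec_merge_mutations mutations1 mutations2 out) := by unfold Spec_merge_mutations; infer_instance

-- ===== CLAIM (what is proved, stated in full; the proofs are below) =====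
def Claim_equal_merge_mutations : Prop := ∀ (mutations1 : List (Int × List (String × Int))) (mutations2 : List (Int × List (String × Int))), Dom_merge_mutations mutations1 mutations2 → Pre_merge_mutations mutations1 mutations2 → Spec_merge_mutations mutations1 mutations2 (merge_mutations mutations1 mutations2)

-- ===== LEMMAS AND PROOFS =====

-- L1: Set.update of a nodup iterable appends the new elements
theorem pv_set_update_eq {κ : Type} [BEq κ] [LawfulBEq κ] (s t : List κ) (ht : t.Nodup) :
    PySem.Set.update s t = s ++ t.filter (fun a => !s.contains a) := by
  induction t generalizing s with
  | nil => simp [PySem.Set.update]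
  | cons a t ih =>
    rcases List.nodup_cons.mp ht with ⟨ha, ht'⟩
    show PySem.Set.update (PySem.Set.add s a) t = _
    by_cases h : a ∈ s
    · rw [show PySem.Set.add s a = s by simp [PySem.Set.add, PySem.Set.contains, h]]
      rw [ih s ht']
      simp [List.filter_cons, h]
    · rw [show PySem.Set.add s a = s ++ [a] by simp [PySem.Set.add, PySem.Set.contains, h]]
      rw [ih _ ht']
      rw [List.filter_congr (l := t) (q := fun x => !s.contains x)]
      · simp [List.filter_cons, h]
      · intro x hx
        have hxa : x ≠ a := fun he => ha (he ▸ hx)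
        simp [List.contains_append, hxa]

theorem pv_set_ofList_eq {κ : Type} [BEq κ] [LawfulBEq κ] (t : List κ) (ht : t.Nodup) :
    PySem.Set.ofList t = t := by
  rw [show PySem.Set.ofList t = PySem.Set.update [] t from rfl, pv_set_update_eq [] t ht]
  simp

theorem pv_set_update_nodup {κ : Type} [BEq κ] [LawfulBEq κ] (s t : List κ) (hs : s.Nodup) (ht : t.Nodup) :
    (PySem.Set.update s t).Nodup := by
  rw [pv_set_update_eq s t ht]
  refine List.Nodup.append hs (ht.filter _) ?_
  intro x hxs hxt
  have := List.of_mem_filter hxt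
  simp_all [List.contains_iff_mem]

-- L3: get? on a value-mapped literal dict
theorem pv_get?_mk_map {κ β ν : Type} [BEq κ] [LawfulBEq κ] (l : List (κ × β)) (f : β → ν) (k : κ) :
    (PySem.Dict.mk (l.map (fun q => (q.1, f q.2)))).get? k = ((PySem.Dict.mk l).get? k).map f := by
  induction l with
  | nil => simp [PySem.Dict.get?]
  | cons q l ih =>
    obtain ⟨a, b⟩ := q
    simp only [List.map_cons, PySem.Dict.get?_mk_cons]
    by_cases h : a == k
    · simp [h]
    · simp [h, ih]

-- L4: getD after a fold that inserts at each pair's own key, keys nodup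
theorem pv_getD_foldl_patch {κ β ν : Type} [BEq κ] [LawfulBEq κ] (l : List (κ × β))
    (g : ν → β → ν) (d : PySem.Dict κ ν) (d0 : ν) (hl : (l.map Prod.fst).Nodup) (k : κ) :
    (l.foldl (fun acc q => acc.insert q.1 (g (acc.getD q.1 d0) q.2)) d).getD k d0 =
      match (PySem.Dict.mk l).get? k with
      | some b => g (d.getD k d0) b
      | none => d.getD k d0 := by
  induction l generalizing d with
  | nil => simp [PySem.Dict.get?]
  | cons q l ih =>
    obtain ⟨a, b⟩ := q
    simp only [List.map_cons, List.nodup_cons] at hl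
    obtain ⟨hq, hl'⟩ := hl
    simp only [List.foldl_cons, PySem.Dict.get?_mk_cons]
    rw [ih _ hl']
    by_cases h : k = a
    · subst h
      have hnone : (PySem.Dict.mk l).get? k = none := by
        rw [PySem.Dict.get?_eq_none_iff_not_mem_keys]
        simpa [PySem.Dict.keys] using hq
      simp [hnone, PySem.Dict.getD_insert_self]
    · have hba : (a == k) = false := by simpa using fun he => h he.symm
      simp only [hba, Bool.false_eq_true, if_false,
        PySem.Dict.getD_insert_of_ne _ _ _ h]


-- L6: items of the patch pass
theorem pv_patch_items (y : List (String × Int)) (s : PySem.Dict String (List Int))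
    (hs : s.keys.Nodup) (hy : (y.map Prod.fst).Nodup) :
    (mmB_patch s y).items =
      s.items.map (fun q => match (PySem.Dict.mk y).get? q.1 with
        | some v => (q.1, q.2.set 1 v)
        | none => q)
      ++ (y.filter (fun p => !(s.contains p.1))).map (fun p => (p.1, ([0, p.2] : List Int))) := by
  induction y generalizing s with
  | nil => simp [mmB_patch, PySem.Dict.get?]
  | cons p y ih =>
    obtain ⟨a, b⟩ := p
    simp only [List.map_cons, List.nodup_cons] at hy
    obtain ⟨ha, hy'⟩ := hy
    have hstep : mmB_patch s ((a, b) :: y) =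
        mmB_patch (if s.contains a then s.modify a [] (fun v => v.set 1 b) else s.insert a [0, b]) y := by
      simp [mmB_patch]
    rw [hstep]
    by_cases hc : s.contains a
    · -- key present: modify = insert of the patched value
      simp only [hc, if_true]
      set s' := s.modify a [] (fun v => v.set 1 b) with hs'
      have hks' : s'.keys = s.keys := by
        rw [hs', PySem.Dict.keys_modify, PySem.Dict.keys_insert_of_contains _ _ hc]
      rw [ih s' (hks' ▸ hs) hy']
      have hitems' : s'.items = s.items.map (fun q => if (q.1 == a) = true then (a, (s.getD a []).set 1 b) else q) := by
        rw [hs']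
        exact PySem.Dict.items_insert_of_contains _ _ hc
      rw [hitems', List.map_map]
      congr 1
      · -- the mapped part
        apply List.map_congr_left
        intro q hq
        by_cases hqa : q.1 = a
        · have hget : (PySem.Dict.mk y).get? a = none := by
            rw [PySem.Dict.get?_eq_none_iff_not_mem_keys]
            simpa [PySem.Dict.keys] using ha
          have hsga : s.getD a [] = q.2 := by
            rw [← hqa]
            exact PySem.Dict.getD_of_mem_items s (by simpa using hq) hs []
          simp [Function.comp, hqa, hget, PySem.Dict.get?_mk_cons, hsga]
        · have hba : (q.1 == a) = false := by simpa using hqa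
          have hab : (a == q.1) = false := by simpa using fun he => hqa he.symm
          simp [Function.comp, hba, hab, PySem.Dict.get?_mk_cons]
      · -- the filter part
        rw [List.filter_cons]
        simp only [hc, Bool.not_true, Bool.false_eq_true, if_false]
        congr 1
        apply List.filter_congr
        intro x hx
        have hxa : x.1 ≠ a := fun he => ha (he ▸ (List.mem_map_of_mem hx))
        rw [hs']
        simp [PySem.Dict.contains_modify, hxa]
    · -- key absent: append a fresh entry
      simp only [hc, Bool.not_true, if_false, Bool.false_eq_true]
      set s' := s.insert a [0, b] with hs'
      have hks' : s'.keys = s.keys ++ [a] := by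
        rw [hs']
        exact PySem.Dict.keys_insert_of_not_contains _ _ (by simpa using hc)
      have hnd' : s'.keys.Nodup := by
        rw [hks']
        refine List.Nodup.append hs (List.nodup_singleton a) ?_
        intro x hxk hxa
        rcases List.mem_singleton.mp hxa with rfl
        exact hc ((PySem.Dict.contains_iff_mem_keys s x).mpr hxk)
      rw [ih s' hnd' hy']
      have hitems' : s'.items = s.items ++ [(a, ([0, b] : List Int))] := by
        rw [hs']
        exact PySem.Dict.items_insert_of_not_contains _ _ (by simpa using hc)
      rw [hitems', List.map_append]
      have hmain : s.items.map (fun q => match (PySem.Dict.mk y).get? q.1 with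
            | some v => (q.1, q.2.set 1 v) | none => q) =
          s.items.map (fun q => match (PySem.Dict.mk ((a, b) :: y)).get? q.1 with
            | some v => (q.1, q.2.set 1 v) | none => q) := by
        apply List.map_congr_left
        intro q hq
        have hqk : q.1 ∈ s.keys := by
          simp only [PySem.Dict.keys]
          exact List.mem_map_of_mem hq
        have hqa : (a == q.1) = false := by
          simp only [beq_eq_false_iff_ne]
          intro he
          exact hc ((PySem.Dict.contains_iff_mem_keys s a).mpr (he ▸ hqk))
        rw [PySem.Dict.get?_mk_cons, if_neg (by simp [hqa])]
      have hsmall : [(a, ([0, b] : List Int))].map (fun q => match (PySem.Dict.mk y).get? q.1 with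
            | some v => (q.1, q.2.set 1 v) | none => q) = [(a, ([0, b] : List Int))] := by
        have hget : (PySem.Dict.mk y).get? a = none := by
          rw [PySem.Dict.get?_eq_none_iff_not_mem_keys]
          simpa [PySem.Dict.keys] using ha
        simp [hget]
      rw [hmain, hsmall]
      have hfil : y.filter (fun p => !(s'.contains p.1)) = y.filter (fun p => !(s.contains p.1)) := by
        apply List.filter_congr
        intro x hx
        have hxa : x.1 ≠ a := fun he => ha (he ▸ (List.mem_map_of_mem hx))
        rw [hs']
        simp [PySem.Dict.contains_insert, hxa]
      rw [List.filter_cons]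
      simp only [hc, Bool.not_false, if_true, hfil]
      simp

-- contains on a value-mapped literal dict
theorem pv_contains_mk_map {κ β ν : Type} [BEq κ] [LawfulBEq κ] (l : List (κ × β)) (f : β → ν) (k : κ) :
    (PySem.Dict.mk (l.map (fun q => (q.1, f q.2)))).contains k = (PySem.Dict.mk l).contains k := by
  rw [PySem.Dict.contains_eq_isSome_get?, PySem.Dict.contains_eq_isSome_get?, pv_get?_mk_map]
  cases (PySem.Dict.mk l).get? k <;> rfl

-- L7: B's seed-then-patch inner dict has exactly A's inner items
theorem pv_inner_eq (x y : List (String × Int)) (hx : (x.map Prod.fst).Nodup) (hy : (y.map Prod.fst).Nodup) :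
    (mmB_patch (PySem.Dict.mk (x.map (fun p => (p.1, ([p.2, 0] : List Int))))) y).items =
      (PySem.Set.union (PySem.Set.ofList ((PySem.Dict.mk x).keys)) (PySem.Set.ofList ((PySem.Dict.mk y).keys))).map
        (fun aa => (aa, ([(PySem.Dict.mk x).getD aa 0, (PySem.Dict.mk y).getD aa 0] : List Int))) := by
  have hkx : (PySem.Dict.mk x).keys = x.map Prod.fst := rfl
  have hky : (PySem.Dict.mk y).keys = y.map Prod.fst := rfl
  have hseedkeys : (PySem.Dict.mk (x.map (fun p => (p.1, ([p.2, 0] : List Int))))).keys = x.map Prod.fst := by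
    simp [PySem.Dict.keys]
  rw [pv_patch_items y _ (by rw [hseedkeys]; exact hx) hy]
  rw [show PySem.Set.union (PySem.Set.ofList ((PySem.Dict.mk x).keys)) (PySem.Set.ofList ((PySem.Dict.mk y).keys))
        = PySem.Set.update (PySem.Set.ofList ((PySem.Dict.mk x).keys)) (PySem.Set.ofList ((PySem.Dict.mk y).keys)) from rfl]
  rw [hkx, hky, pv_set_ofList_eq _ hx, pv_set_ofList_eq _ hy,
      pv_set_update_eq _ _ hy, List.map_append]
  congr 1
  · -- seeded part
    rw [show (PySem.Dict.mk (x.map (fun p => (p.1, ([p.2, 0] : List Int))))).items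
          = x.map (fun p => (p.1, ([p.2, 0] : List Int))) from rfl]
    rw [List.map_map, List.map_map]
    apply List.map_congr_left
    intro p hp
    have hxd : (PySem.Dict.mk x).getD p.1 0 = p.2 :=
      PySem.Dict.getD_of_mem_items _ (by simpa using hp) hx 0
    simp only [Function.comp]
    rw [PySem.Dict.getD_eq_get?_getD (PySem.Dict.mk y) p.1 0, hxd]
    cases hg : (PySem.Dict.mk y).get? p.1 <;> simp
  · -- fresh part from y
    rw [List.filter_map, List.map_map]
    have hfil : y.filter (fun p => !(PySem.Dict.mk (x.map (fun p => (p.1, ([p.2, 0] : List Int))))).contains p.1)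
        = y.filter ((fun a => !(x.map Prod.fst).contains a) ∘ Prod.fst) := by
      apply List.filter_congr
      intro p hp
      simp only [Function.comp, pv_contains_mk_map]
      rw [PySem.Dict.contains_eq_decide_mem_keys]
      simp [hkx, List.contains_iff_mem]
    rw [hfil]
    apply List.map_congr_left
    intro p hp
    have hpy : p ∈ y := List.mem_of_mem_filter hp
    have hpc := List.of_mem_filter hp
    simp only [Function.comp] at hpc
    have hmem : p.1 ∉ x.map Prod.fst := by simpa [List.contains_iff_mem] using hpc
    have hcx : (PySem.Dict.mk x).contains p.1 = false := by
      rw [PySem.Dict.contains_eq_decide_mem_keys, hkx]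
      simpa using hmem
    have hxd : (PySem.Dict.mk x).getD p.1 0 = 0 :=
      PySem.Dict.getD_of_not_contains _ _ hcx
    have hyd : (PySem.Dict.mk y).getD p.1 0 = p.2 :=
      PySem.Dict.getD_of_mem_items _ (by simpa using hpy) hy 0
    simp [hxd, hyd]


theorem pv_main (m1 m2 : List (Int × List (String × Int)))
    (h1 : (m1.map Prod.fst).Nodup) (h1i : ∀ q ∈ m1, (q.2.map Prod.fst).Nodup)
    (h2 : (m2.map Prod.fst).Nodup) (h2i : ∀ q ∈ m2, (q.2.map Prod.fst).Nodup) :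
    merge_mutations m1 m2 = merge_mutations_alt m1 m2 := by
  simp only [merge_mutations, merge_mutations_alt]
  have hku : PySem.Set.union (PySem.Set.ofList ((PySem.Dict.mk m1).keys)) ((PySem.Dict.mk m2).keys)
      = PySem.Set.update (m1.map Prod.fst) (m2.map Prod.fst) := by
    rw [show (PySem.Dict.mk m1).keys = m1.map Prod.fst from rfl,
        show (PySem.Dict.mk m2).keys = m2.map Prod.fst from rfl]
    rw [show ∀ s t : List Int, PySem.Set.union s t = PySem.Set.update s t from fun _ _ => rfl]
    rw [pv_set_ofList_eq _ h1]
  have hKnd : (PySem.Set.update (m1.map Prod.fst) (m2.map Prod.fst)).Nodup :=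
    pv_set_update_nodup _ _ h1 h2
  rw [hku]
  set K := PySem.Set.update (m1.map Prod.fst) (m2.map Prod.fst) with hK
  set innerA : Int → PySem.Dict String (List Int) := fun key =>
    (PySem.Set.union (PySem.Set.ofList ((PySem.Dict.mk ((PySem.Dict.mk m1).getD key [])).keys))
        (PySem.Set.ofList ((PySem.Dict.mk ((PySem.Dict.mk m2).getD key [])).keys))).foldl
      (fun acc aa_key => acc.insert aa_key
        [(PySem.Dict.mk ((PySem.Dict.mk m1).getD key [])).getD aa_key 0,
         (PySem.Dict.mk ((PySem.Dict.mk m2).getD key [])).getD aa_key 0]) PySem.Dict.empty with hinnerA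
  have hA : (K.foldl (fun merged key => merged.insert key (innerA key)) PySem.Dict.empty).items
      = K.map (fun key => (key, innerA key)) := by
    rw [PySem.Dict.items_foldl_insert_fresh K (fun a => a) innerA PySem.Dict.empty
        (fun a _ => by simp) (by simpa using hKnd)]
    simp [PySem.Dict.empty]
  set seedf : List (String × Int) → PySem.Dict String (List Int) :=
    fun inner => PySem.Dict.mk (inner.map (fun p => (p.1, ([p.2, 0] : List Int)))) with hseedf
  set init : PySem.Dict Int (PySem.Dict String (List Int)) :=
    PySem.Dict.mk (m1.map (fun q => (q.1, seedf q.2))) with hinit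
  set final : PySem.Dict Int (PySem.Dict String (List Int)) :=
    m2.foldl (fun acc q => acc.insert q.1 (mmB_patch (acc.getD q.1 PySem.Dict.empty) q.2)) init with hfinal
  have hinitkeys : init.keys = m1.map Prod.fst := by
    simp [hinit, PySem.Dict.keys]
  have hfkeys : final.keys = K := by
    rw [hfinal, PySem.Dict.keys_foldl_insert_key m2 Prod.fst
        (fun acc q => mmB_patch (acc.getD q.1 PySem.Dict.empty) q.2) init, hinitkeys]
  have hfnd : final.keys.Nodup := by
    rw [hfinal]
    exact PySem.Dict.nodup_keys_foldl_insert_key m2 Prod.fst _ init (by rwa [hinitkeys])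
  have hB : final.items = K.map (fun k => (k, final.getD k PySem.Dict.empty)) := by
    rw [PySem.Dict.items_eq_map_keys final hfnd PySem.Dict.empty, hfkeys]
  rw [hA, hB, List.map_map, List.map_map]
  apply List.map_congr_left
  intro k hk
  simp only [Function.comp]
  refine Prod.ext rfl ?_
  have hgetfinal := pv_getD_foldl_patch m2 mmB_patch init PySem.Dict.empty h2 k
  rw [← hfinal] at hgetfinal
  have hgetinit : init.getD k PySem.Dict.empty = seedf ((PySem.Dict.mk m1).getD k []) := by
    rw [hinit, PySem.Dict.getD_eq_get?_getD, pv_get?_mk_map m1 seedf k]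
    cases hg : (PySem.Dict.mk m1).get? k with
    | none =>
      rw [PySem.Dict.getD_of_get?_eq_none _ _ hg]
      rfl
    | some xv =>
      rw [PySem.Dict.getD_of_get?_eq_some _ _ hg]
      rfl
  have hpatch : final.getD k PySem.Dict.empty
      = mmB_patch (seedf ((PySem.Dict.mk m1).getD k [])) ((PySem.Dict.mk m2).getD k []) := by
    rw [hgetfinal]
    cases hg2 : (PySem.Dict.mk m2).get? k with
    | none =>
      rw [PySem.Dict.getD_of_get?_eq_none _ _ hg2, hgetinit]
      rfl
    | some b =>
      rw [PySem.Dict.getD_of_get?_eq_some _ _ hg2, hgetinit]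
  -- nodup of the inner key lists
  have hXnd : (((PySem.Dict.mk m1).getD k []).map Prod.fst).Nodup := by
    cases hg : (PySem.Dict.mk m1).get? k with
    | none => rw [PySem.Dict.getD_of_get?_eq_none _ _ hg]; simp
    | some xv =>
      rw [PySem.Dict.getD_of_get?_eq_some _ _ hg]
      exact h1i (k, xv) (PySem.Dict.mem_items_of_get?_eq_some _ hg)
  have hYnd : (((PySem.Dict.mk m2).getD k []).map Prod.fst).Nodup := by
    cases hg : (PySem.Dict.mk m2).get? k with
    | none => rw [PySem.Dict.getD_of_get?_eq_none _ _ hg]; simp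
    | some yv =>
      rw [PySem.Dict.getD_of_get?_eq_some _ _ hg]
      exact h2i (k, yv) (PySem.Dict.mem_items_of_get?_eq_some _ hg)
  rw [hpatch, hseedf]
  rw [pv_inner_eq _ _ hXnd hYnd]
  -- A's inner fold equals the same map
  rw [hinnerA]
  set S := PySem.Set.union (PySem.Set.ofList ((PySem.Dict.mk ((PySem.Dict.mk m1).getD k [])).keys))
      (PySem.Set.ofList ((PySem.Dict.mk ((PySem.Dict.mk m2).getD k [])).keys)) with hS
  have hSnd : S.Nodup := by
    rw [hS, show ∀ s t : List String, PySem.Set.union s t = PySem.Set.update s t from fun _ _ => rfl]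
    exact pv_set_update_nodup _ _ (PySem.Set.nodup_ofList _) (PySem.Set.nodup_ofList _)
  rw [PySem.Dict.items_foldl_insert_fresh S (fun a => a) _ PySem.Dict.empty
      (fun a _ => by simp) (by simpa using hSnd)]
  simp [PySem.Dict.empty]

-- ===== VERDICT (by name: the statement is the Claim_ definition above) =====
theorem merge_mutations_spec : Claim_equal_merge_mutations := by
  intro m1 m2 _ hpre
  obtain ⟨h1, h1i, h2, h2i⟩ := hpre
  unfold Spec_merge_mutations
  exact pv_main m1 m2 h1 h1i h2 h2i
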